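-- pv_equiv track=rewrite | github.com/aryanvash10/Internship-Work-PFI | NPPIC.py | generate_date_range
-- ===== SOURCE A (Python) =====
-- def generate_date_range(start_year, start_month, end_year, end_month):
--     """
--     Generate list of (year, month) tuples for the given date range
--
--     Args:
--         start_year (int): Starting year
--         start_month (int): Starting month (1-12)
--         end_year (int): Ending year
--         end_month (int): Ending month (1-12)
--
--     Returns:
--         list: List of (year, month_name) tuples
--     """
--     months = ['JAN', 'FEB', 'MAR', 'APR', 'MAY', 'JUN',
--               'JUL', 'AUG', 'SEP', 'OCT', 'NOV', 'DEC']
--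
--     date_range = []
--     current_year = start_year
--     current_month = start_month
--
--     while (current_year < end_year) or (current_year == end_year and current_month <= end_month):
--         date_range.append((str(current_year), months[current_month - 1]))
--
--         current_month += 1
--         if current_month > 12:
--             current_month = 1
--             current_year += 1
--
--     return date_range
-- ===== SOURCE B (Python) =====
-- def generate_date_range(start_year, start_month, end_year, end_month):
--     months = ['JAN', 'FEB', 'MAR', 'APR', 'MAY', 'JUN',
--               'JUL', 'AUG', 'SEP', 'OCT', 'NOV', 'DEC']
--     start_idx = start_year * 12 + (start_month - 1)
--     end_idx = end_year * 12 + (end_month - 1)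
--     return [(str(idx // 12), months[idx % 12]) for idx in range(start_idx, end_idx + 1)]
-- ===== Notes on version B (the rewrite author's own statement) =====
-- stated objective: simpler
-- what changed: Replaces A's stateful while-loop with month-increment-and-carry by a single comprehension over a flat range of absolute month indices (year*12+month-1), decoding each index with // and %.
-- outside the precondition, e.g. on generate_date_range(0, 0, 0, 0): A returns [('0', 'DEC')], B returns [('-1', 'DEC')]; on generate_date_range(0, 12, 0, 13): A returns [('0', 'DEC')], B returns [('0', 'DEC'), ('1', 'JAN')]; on generate_date_range(1, 1, 0, 13): A returns [], B returns [('1', 'JAN')]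
import Mathlib
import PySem

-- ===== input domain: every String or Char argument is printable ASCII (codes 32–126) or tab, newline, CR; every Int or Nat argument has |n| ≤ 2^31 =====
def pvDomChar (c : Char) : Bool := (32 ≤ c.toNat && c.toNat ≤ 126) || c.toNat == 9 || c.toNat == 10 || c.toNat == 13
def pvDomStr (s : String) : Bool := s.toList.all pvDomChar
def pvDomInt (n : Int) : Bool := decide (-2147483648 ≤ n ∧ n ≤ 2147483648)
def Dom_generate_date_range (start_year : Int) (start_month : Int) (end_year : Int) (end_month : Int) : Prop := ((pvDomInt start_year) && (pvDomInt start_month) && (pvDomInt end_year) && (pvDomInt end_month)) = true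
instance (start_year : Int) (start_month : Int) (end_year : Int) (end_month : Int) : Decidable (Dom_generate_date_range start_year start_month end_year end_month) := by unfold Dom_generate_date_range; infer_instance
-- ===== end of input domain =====

-- B replaces A's stateful carry loop (month += 1, wrap at 12) by a single flat
-- range of absolute month indices decoded with // and % — simpler, no mutable state.

-- ===== PORT A =====
def pvMonthsA : List String :=
  ["JAN", "FEB", "MAR", "APR", "MAY", "JUN", "JUL", "AUG", "SEP", "OCT", "NOV", "DEC"]

-- the while loop of A, as recursion on the loop state (current_year, current_month, date_range);
-- the `none` branch is Python's IndexError on months[current_month - 1] (outside Pre_)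
def pvLoopA (end_year end_month : Int) (current_year current_month : Int)
    (date_range : List (String × String)) : List (String × String) :=
  if current_year < end_year ∨ (current_year = end_year ∧ current_month ≤ end_month) then
    match hm : PySem.List.pyGet? pvMonthsA (current_month - 1) with
    | none => date_range
    | some name =>
      if current_month + 1 > 12 then
        pvLoopA end_year end_month (current_year + 1) 1
          (date_range ++ [(PySem.Int.toStr current_year, name)])
      else
        pvLoopA end_year end_month current_year (current_month + 1)
          (date_range ++ [(PySem.Int.toStr current_year, name)])
  else date_range
termination_by ((end_year - current_year) * 26 + 13 - current_month).toNat
decreasing_by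
  all_goals
    rename_i h
    have hin : PySem.Raise.InRange pvMonthsA.length (current_month - 1) := by
      by_contra hc
      rw [← PySem.List.pyGet?_eq_none_iff] at hc
      simp [hc] at hm
    simp [PySem.Raise.InRange, pvMonthsA] at hin
    omega

def generate_date_range (start_year : Int) (start_month : Int) (end_year : Int) (end_month : Int) : List (String × String) :=
  pvLoopA end_year end_month start_year start_month []

-- ===== PORT B =====
def pvMonthsB : List String :=
  ["JAN", "FEB", "MAR", "APR", "MAY", "JUN", "JUL", "AUG", "SEP", "OCT", "NOV", "DEC"]

def generate_date_range_alt (start_year : Int) (start_month : Int) (end_year : Int) (end_month : Int) : List (String × String) :=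
  let start_idx := start_year * 12 + (start_month - 1)
  let end_idx := end_year * 12 + (end_month - 1)
  (PySem.List.pyRange start_idx (end_idx + 1) 1).map (fun idx =>
    (PySem.Int.toStr (PySem.Int.floordiv idx 12),
     (PySem.List.pyGet? pvMonthsB (PySem.Int.mod idx 12)).getD ""))

-- ===== PRECONDITION & SPEC =====
-- Pre_ admits the documented month domain 1–12, and also any input whose start lies after its
-- end both in the loop's (year, month) ordering and in the absolute-month ordering (there both
-- programs return the empty list); it excludes out-of-domain months with a nonempty range,
-- where A raises IndexError or returns values produced by Python's negative-index wraparound /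
-- the loop's silent clamp at DEC, artefacts of A's implementation on months outside 1-12.
def Pre_generate_date_range (start_year : Int) (start_month : Int) (end_year : Int) (end_month : Int) : Prop :=
  (1 ≤ start_month ∧ start_month ≤ 12 ∧ 1 ≤ end_month ∧ end_month ≤ 12) ∨
  ((end_year < start_year ∨ (end_year = start_year ∧ end_month < start_month)) ∧
    end_year * 12 + end_month < start_year * 12 + start_month)

instance (start_year : Int) (start_month : Int) (end_year : Int) (end_month : Int) : Decidable (Pre_generate_date_range start_year start_month end_year end_month) := by unfold Pre_generate_date_range; infer_instance

def pvWitness_generate_date_range : Int × Int × Int × Int := (2020, 11, 2021, 2)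

def Spec_generate_date_range (start_year : Int) (start_month : Int) (end_year : Int) (end_month : Int) (out : List (String × String)) : Prop := out = generate_date_range_alt start_year start_month end_year end_month
instance (start_year : Int) (start_month : Int) (end_year : Int) (end_month : Int) (out : List (String × String)) : Decidable (Spec_generate_date_range start_year start_month end_year end_month out) := by unfold Spec_generate_date_range; infer_instance

-- ===== CLAIM (what is proved, stated in full; the proofs are below) =====
def Claim_equal_generate_date_range : Prop := ∀ (start_year : Int) (start_month : Int) (end_year : Int) (end_month : Int), Dom_generate_date_range start_year start_month end_year end_month → Pre_generate_date_range start_year start_month end_year end_month → Spec_generate_date_range start_year start_month end_year end_month (generate_date_range start_year start_month end_year end_month)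

-- ===== LEMMAS AND PROOFS =====

theorem pvLoopA_eq (end_year end_month : Int) (hem1 : 1 ≤ end_month) (hem2 : end_month ≤ 12)
    (cy cm : Int) (acc : List (String × String)) (hcm1 : 1 ≤ cm) (hcm2 : cm ≤ 12) :
    pvLoopA end_year end_month cy cm acc =
      acc ++ (PySem.List.pyRange (cy * 12 + (cm - 1)) (end_year * 12 + (end_month - 1) + 1) 1).map
        (fun idx => (PySem.Int.toStr (PySem.Int.floordiv idx 12),
          (PySem.List.pyGet? pvMonthsB (PySem.Int.mod idx 12)).getD "")) := by
  rw [pvLoopA]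
  by_cases h : cy < end_year ∨ (cy = end_year ∧ cm ≤ end_month)
  · simp only [if_pos h]
    have hget : PySem.List.pyGet? pvMonthsA (cm - 1) =
        some (pvMonthsA[(cm - 1).toNat]'(by simp [pvMonthsA]; omega)) :=
      PySem.List.pyGet?_eq_some_getElem pvMonthsA (by omega) (by simp [pvMonthsA]; omega)
    rw [hget]
    have hlt : cy * 12 + (cm - 1) < end_year * 12 + (end_month - 1) + 1 := by
      rcases h with h | ⟨h, h'⟩ <;> nlinarith
    have hcons := PySem.List.pyRange_one_cons hlt
    have hf : PySem.Int.floordiv (cy * 12 + (cm - 1)) 12 = cy := by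
      rw [PySem.Int.floordiv_eq_iff_of_pos (by norm_num)]; omega
    have hm : PySem.Int.mod (cy * 12 + (cm - 1)) 12 = cm - 1 := by
      have := PySem.Int.floordiv_mul_add_mod (cy * 12 + (cm - 1)) 12
      rw [hf] at this; omega
    have hBA : PySem.List.pyGet? pvMonthsB (cm - 1) =
        some (pvMonthsA[(cm - 1).toNat]'(by simp [pvMonthsA]; omega)) := hget
    by_cases hw : cm + 1 > 12
    · have hcm12 : cm = 12 := by omega
      simp only [if_pos hw]
      rw [pvLoopA_eq end_year end_month hem1 hem2 (cy + 1) 1 _ (by omega) (by omega)]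
      have : (cy + 1) * 12 + (1 - 1) = cy * 12 + (cm - 1) + 1 := by omega
      rw [this]
      rw [hcons]
      simp only [List.map_cons, hf, hm, hBA]
      simp
    · simp only [if_neg hw]
      rw [pvLoopA_eq end_year end_month hem1 hem2 cy (cm + 1) _ (by omega) (by omega)]
      have : cy * 12 + (cm + 1 - 1) = cy * 12 + (cm - 1) + 1 := by omega
      rw [this]
      rw [hcons]
      simp only [List.map_cons, hf, hm, hBA]
      simp
  · simp only [if_neg h]
    have hle : end_year * 12 + (end_month - 1) + 1 ≤ cy * 12 + (cm - 1) := by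
      by_cases hc : cy = end_year
      · have h2 : ¬ cm ≤ end_month := fun hmm => h (Or.inr ⟨hc, hmm⟩)
        omega
      · have h1 : ¬ cy < end_year := fun hlt => h (Or.inl hlt)
        have h3 : end_year + 1 ≤ cy := by omega
        nlinarith
    rw [PySem.List.pyRange_one_eq_nil hle]
    simp
termination_by ((end_year - cy) * 26 + 13 - cm).toNat
decreasing_by all_goals omega

-- ===== VERDICT (by name: the statement is the Claim_ definition above) =====
theorem generate_date_range_spec : Claim_equal_generate_date_range := by
  intro sy sm ey em _ hpre
  unfold Spec_generate_date_range generate_date_range generate_date_range_alt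
  rcases hpre with ⟨h1, h2, h3, h4⟩ | ⟨hafter, habs⟩
  · rw [pvLoopA_eq ey em h3 h4 sy sm [] h1 h2]
    simp
  · rw [pvLoopA, if_neg (by omega : ¬ (sy < ey ∨ (sy = ey ∧ sm ≤ em)))]
    simp [PySem.List.pyRange_one_eq_nil
      (show ey * 12 + (em - 1) + 1 ≤ sy * 12 + (sm - 1) by omega)]
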